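-- pv_equiv track=rewrite | github.com/SeekingDream/DLCompilerAttack | src/attack/v_search.py | min_indices_under_limit
-- ===== SOURCE A (Python) =====
-- def min_indices_under_limit(lst, min_dim=10):
--
--     indexed_lengths = [(i, len(x)) for i, x in enumerate(lst) if x is not None]
--
--     # Sort by length ascending
--     indexed_lengths.sort(key=lambda x: x[1])
--
--     selected = []
--     total_len = 0
--
--     # Greedily add smallest lists until sum < limit
--     for idx, l in indexed_lengths:
--         if total_len + l < min_dim:
--             selected.append(idx)
--             total_len += l
--         else:
--             break
--
--     return selected, total_len
-- ===== SOURCE B (Python) =====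
-- def min_indices_under_limit(lst, min_dim=10):
--     # Bucket the non-None entries by length (one pass), then walk the distinct
--     # lengths in increasing order taking whole buckets; in the boundary bucket
--     # the number of items that still fit is computed arithmetically.
--     buckets = {}
--     for i, x in enumerate(lst):
--         if x is not None:
--             buckets.setdefault(len(x), []).append(i)
--     selected, total = [], 0
--     for l in sorted(buckets):
--         idxs = buckets[l]
--         if l == 0:
--             take = len(idxs) if total < min_dim else 0
--         else:
--             take = min(len(idxs), max(0, (min_dim - 1 - total) // l))
--         selected += idxs[:take]
--         total += take * l
--         if take < len(idxs):
--             break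
--     return selected, total
-- ===== Notes on version B (the rewrite author's own statement) =====
-- stated objective: alternative
-- what changed: A sorts all (index,length) pairs and scans them one element at a time with a greedy break; B never sorts the elements: it buckets indices by length in a dict in one pass, sorts only the distinct lengths, takes whole buckets, and computes the partial take in the boundary bucket arithmetically with floor division.
import Mathlib
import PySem

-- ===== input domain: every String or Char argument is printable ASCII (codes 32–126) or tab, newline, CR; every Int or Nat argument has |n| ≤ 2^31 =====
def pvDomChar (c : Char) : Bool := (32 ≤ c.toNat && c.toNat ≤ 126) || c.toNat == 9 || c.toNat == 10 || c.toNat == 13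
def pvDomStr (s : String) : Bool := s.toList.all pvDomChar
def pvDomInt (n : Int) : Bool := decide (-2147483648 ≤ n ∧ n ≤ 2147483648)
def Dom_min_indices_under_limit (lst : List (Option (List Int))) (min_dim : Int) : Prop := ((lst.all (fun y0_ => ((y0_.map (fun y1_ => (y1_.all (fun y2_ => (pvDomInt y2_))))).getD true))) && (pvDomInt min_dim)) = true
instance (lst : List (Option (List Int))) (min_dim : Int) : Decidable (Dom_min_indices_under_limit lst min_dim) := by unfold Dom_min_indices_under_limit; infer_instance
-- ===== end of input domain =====

-- B replaces A's sort-all-pairs + per-element greedy scan by a one-pass dict of length->indices buckets,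
-- iterated over the sorted DISTINCT lengths taking whole buckets, with the boundary bucket's partial take
-- computed by floor division (alternative algorithm, same return value).


-- ===== PORT A =====
-- the comprehension [(i, len(x)) for i, x in enumerate(lst) if x is not None]
def pvIndexedLengths (lst : List (Option (List Int))) : List (Int × Int) :=
  (PySem.List.enumerate lst).filterMap (fun p =>
    match p.2 with
    | none => none
    | some x => some (p.1, (x.length : Int)))

-- A's for-loop with its break, carrying (selected, total_len)
def pvALoop (min_dim : Int) : List (Int × Int) → List Int → Int → List Int × Int
  | [], selected, total_len => (selected, total_len)
  | (idx, l) :: rest, selected, total_len =>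
    if total_len + l < min_dim then pvALoop min_dim rest (selected ++ [idx]) (total_len + l)
    else (selected, total_len)

def min_indices_under_limit (lst : List (Option (List Int))) (min_dim : Int) : List Int × Int :=
  let indexed_lengths := PySem.List.sorted (pvIndexedLengths lst) (fun p => p.2) false
  pvALoop min_dim indexed_lengths [] 0

-- ===== PORT B =====
-- buckets[l] = buckets.get(l, []) + [i]  for each non-None entry, keyed by length
def pvBuckets (lst : List (Option (List Int))) : PySem.Dict Int (List Int) :=
  (PySem.List.enumerate lst).foldl (fun d p =>
    match p.2 with
    | none => d
    | some x => d.modify ((x.length : Int)) [] (fun v => v ++ [p.1])) PySem.Dict.empty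

-- B's loop over the sorted distinct lengths, with the arithmetic take and the break
def pvBLoop (bk : PySem.Dict Int (List Int)) (min_dim : Int) : List Int → List Int → Int → List Int × Int
  | [], sel, tot => (sel, tot)
  | l :: rest, sel, tot =>
    let idxs := bk.getD l []
    let take : Int :=
      if l = 0 then (if tot < min_dim then (idxs.length : Int) else 0)
      else min (idxs.length : Int) (max 0 (PySem.Int.floordiv (min_dim - 1 - tot) l))
    let sel' := sel ++ PySem.List.slice idxs none (some take)
    let tot' := tot + take * l
    if take < (idxs.length : Int) then (sel', tot') else pvBLoop bk min_dim rest sel' tot'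

def min_indices_under_limit_alt (lst : List (Option (List Int))) (min_dim : Int) : List Int × Int :=
  let bk := pvBuckets lst
  pvBLoop bk min_dim (PySem.List.sorted bk.keys (fun x => x) false) [] 0

-- ===== PRECONDITION & SPEC =====
def Spec_min_indices_under_limit (lst : List (Option (List Int))) (min_dim : Int) (out : List Int × Int) : Prop := out = min_indices_under_limit_alt lst min_dim
instance (lst : List (Option (List Int))) (min_dim : Int) (out : List Int × Int) : Decidable (Spec_min_indices_under_limit lst min_dim out) := by unfold Spec_min_indices_under_limit; infer_instance

-- ===== CLAIM (what is proved, stated in full; the proofs are below) =====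
def Claim_equal_min_indices_under_limit : Prop := ∀ (lst : List (Option (List Int))) (min_dim : Int), Dom_min_indices_under_limit lst min_dim → Spec_min_indices_under_limit lst min_dim (min_indices_under_limit lst min_dim)

-- ===== LEMMAS AND PROOFS =====

-- the group of pairs with length l, in original order
def pvGrp (xs : List (Int × Int)) (l : Int) : List (Int × Int) :=
  xs.filter (fun p => p.2 == l)

theorem pvGrp_keyed (xs : List (Int × Int)) (l : Int) : ∀ p ∈ pvGrp xs l, p.2 = l := by
  intro p hp
  have := (List.mem_filter.mp hp).2
  simpa using this

theorem pvGrp_append_singleton (xs : List (Int × Int)) (x : Int × Int) (l : Int) :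
    pvGrp (xs ++ [x]) l = if l = x.2 then pvGrp xs l ++ [x] else pvGrp xs l := by
  simp only [pvGrp, List.filter_append, List.filter_cons, List.filter_nil]
  by_cases h : x.2 = l
  · simp [h]
  · simp [h, Ne.symm h]

theorem pvInsertBy_all {α : Type} (before : α → α → Bool) (x : α) (zs : List α)
    (h : ∀ z ∈ zs, before x z = true) :
    PySem.List.insertBy before x zs = x :: zs := by
  cases zs with
  | nil => rfl
  | cons z zs => simp [PySem.List.insertBy, h z (by simp)]

theorem pvInsertBy_append_not {α : Type} (before : α → α → Bool) (x : α) (ys zs : List α)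
    (h : ∀ y ∈ ys, before x y = false) :
    PySem.List.insertBy before x (ys ++ zs) = ys ++ PySem.List.insertBy before x zs := by
  induction ys with
  | nil => simp
  | cons y ys ih =>
    simp only [List.cons_append, PySem.List.insertBy, h y (by simp)]
    simp only [Bool.false_eq_true, if_false, List.cons.injEq, true_and]
    exact ih (fun y hy => h y (by simp [hy]))

theorem pvSorted_snoc {α κ : Type} [LT κ] [DecidableLT κ] (xs : List α) (x : α) (key : α → κ) :
    PySem.List.sorted (xs ++ [x]) key false =
      PySem.List.insertBy (fun a b => decide (key a < key b)) x (PySem.List.sorted xs key false) := by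
  rw [PySem.List.sorted_eq_foldl_insertBy, PySem.List.sorted_eq_foldl_insertBy, List.foldl_append]
  rfl

-- inserting x into the grouped list when its key is already one of the (strictly sorted) group keys
theorem pvInsert_group_mem (x : Int × Int) (g : Int → List (Int × Int))
    (hgk : ∀ l, ∀ p ∈ g l, p.2 = l) :
    ∀ ks : List Int, ks.Pairwise (· < ·) → x.2 ∈ ks →
      PySem.List.insertBy (fun a b => decide (a.2 < b.2)) x (ks.flatMap g) =
        ks.flatMap (fun l => if l = x.2 then g l ++ [x] else g l) := by
  intro ks
  induction ks with
  | nil => intro _ h; cases h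
  | cons k ks ih =>
    intro hpw hmem
    have hpw' := (List.pairwise_cons.mp hpw)
    rcases List.mem_cons.mp hmem with hk | hk
    · -- k = x.2 : x goes right after the bucket of k
      subst hk
      rw [List.flatMap_cons,
        pvInsertBy_append_not _ _ _ _ (fun y hy => by
          have := hgk x.2 y hy; simp [this]),
        pvInsertBy_all _ _ _ (fun z hz => by
          obtain ⟨l, hl, hzl⟩ := List.mem_flatMap.mp hz
          have h1 := hgk l z hzl
          have h2 := hpw'.1 l hl
          simp [h1]; omega)]
      have hcong : ks.flatMap (fun l => if l = x.2 then g l ++ [x] else g l) = ks.flatMap g :=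
        List.flatMap_congr (fun l hl => by
          have := hpw'.1 l hl
          rw [if_neg (by omega)])
      simp only [List.flatMap_cons, hcong]
      simp
    · -- k < x.2 : pass bucket k, recurse
      have hklt : k < x.2 := hpw'.1 _ hk
      rw [List.flatMap_cons,
        pvInsertBy_append_not _ _ _ _ (fun y hy => by
          have := hgk k y hy; simp [this]; omega),
        ih hpw'.2 hk, List.flatMap_cons, if_neg (by omega)]

-- inserting x whose key is new: it lands exactly where the key lands in the sorted key list
theorem pvInsert_group_not_mem (x : Int × Int) (g : Int → List (Int × Int))
    (hgk : ∀ l, ∀ p ∈ g l, p.2 = l) (hg0 : g x.2 = []) :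
    ∀ ks : List Int, ks.Pairwise (· < ·) → x.2 ∉ ks →
      PySem.List.insertBy (fun a b => decide (a.2 < b.2)) x (ks.flatMap g) =
        (PySem.List.insertBy (fun a b => decide (a < b)) x.2 ks).flatMap
          (fun l => if l = x.2 then g l ++ [x] else g l) := by
  intro ks
  induction ks with
  | nil => simp [PySem.List.insertBy, hg0]
  | cons k ks ih =>
    intro hpw hmem
    have hpw' := (List.pairwise_cons.mp hpw)
    by_cases hlt : x.2 < k
    · rw [show PySem.List.insertBy (fun a b => decide (a < b)) x.2 (k :: ks) = x.2 :: k :: ks by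
        simp [PySem.List.insertBy, hlt]]
      rw [pvInsertBy_all _ _ _ (fun z hz => by
        obtain ⟨l, hl, hzl⟩ := List.mem_flatMap.mp hz
        have h1 := hgk l z hzl
        rcases List.mem_cons.mp hl with h | h
        · simp [h1, h]; omega
        · have := hpw'.1 l h; simp [h1]; omega)]
      have hcong : ks.flatMap (fun l => if l = x.2 then g l ++ [x] else g l) = ks.flatMap g :=
        List.flatMap_congr (fun l hl => by
          have := hpw'.1 l hl
          rw [if_neg (by omega)])
      simp only [List.flatMap_cons, hcong]
      simp [hg0, if_neg (show ¬ k = x.2 by omega)]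
    · have hne : k ≠ x.2 := fun h => hmem (by simp [h.symm])
      have hklt : k < x.2 := by
        rcases lt_or_ge k x.2 with h | h
        · exact h
        · exact absurd (lt_of_le_of_ne h (fun hh => hne hh.symm)) hlt
      rw [show PySem.List.insertBy (fun a b => decide (a < b)) x.2 (k :: ks) =
          k :: PySem.List.insertBy (fun a b => decide (a < b)) x.2 ks by
        simp [PySem.List.insertBy, hlt]]
      rw [List.flatMap_cons,
        pvInsertBy_append_not _ _ _ _ (fun y hy => by
          have := hgk k y hy; simp [this]; omega),
        ih hpw'.2 (fun h => hmem (by simp [h])), List.flatMap_cons, if_neg (by omega)]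

-- the stable sort by length is the concatenation of the length-groups in increasing length order
theorem pvSorted_eq_groups : ∀ xs : List (Int × Int),
    PySem.List.sorted xs (fun p => p.2) false =
      (PySem.List.sorted (PySem.Set.ofList (xs.map (fun p => p.2))) (fun x => x) false).flatMap
        (pvGrp xs) := by
  intro xs
  induction xs using List.reverseRecOn with
  | nil => rfl
  | append_singleton xs x ih =>
    have hpw := PySem.List.sorted_ofList_pairwise_lt (xs.map (fun p => p.2))
    have hfun : (fun l => if l = x.2 then pvGrp xs l ++ [x] else pvGrp xs l) = pvGrp (xs ++ [x]) := by
      funext l; rw [pvGrp_append_singleton]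
    have hmapx : (xs ++ [x]).map (fun p => p.2) = xs.map (fun p => p.2) ++ [x.2] := by simp
    rw [pvSorted_snoc, ih, hmapx, PySem.Set.ofList_append_singleton]
    by_cases hm : x.2 ∈ PySem.Set.ofList (xs.map (fun p => p.2))
    · rw [PySem.Set.add_of_mem hm]
      rw [pvInsert_group_mem x (pvGrp xs) (fun l => pvGrp_keyed xs l) _ hpw
        ((PySem.List.mem_sorted _ _ false x.2).mpr hm)]
      rw [hfun]
    · have hg0 : pvGrp xs x.2 = [] := by
        rw [pvGrp, List.filter_eq_nil_iff]
        intro p hp hbeq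
        exact hm ((PySem.Set.mem_ofList _ x.2).mpr
          (List.mem_map.mpr ⟨p, hp, by simpa using hbeq⟩))
      rw [PySem.Set.add_of_not_mem hm, pvSorted_snoc]
      rw [pvInsert_group_not_mem x (pvGrp xs) (fun l => pvGrp_keyed xs l) hg0 _ hpw
        (fun h => hm ((PySem.List.mem_sorted _ _ false x.2).mp h))]
      rw [hfun]

-- pvBuckets is the plain modify-append fold over the swapped (length, index) pairs
theorem pvBuckets_eq_plain : ∀ (L : List (Int × Option (List Int))) (d : PySem.Dict Int (List Int)),
    L.foldl (fun d p =>
      match p.2 with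
      | none => d
      | some x => d.modify ((x.length : Int)) [] (fun v => v ++ [p.1])) d
    = ((L.filterMap (fun p =>
        match p.2 with
        | none => none
        | some x => some (p.1, (x.length : Int)))).map (fun p => (p.2, p.1))).foldl
        (fun d q => d.modify q.1 [] (fun v => v ++ [q.2])) d := by
  intro L
  induction L with
  | nil => intro d; rfl
  | cons p L ih =>
    intro d
    cases hp : p.2 with
    | none => simp [hp, ih]
    | some x => simp [hp, ih]

theorem pvBucket_getD (lst : List (Option (List Int))) (l : Int) :
    (pvBuckets lst).getD l [] = (pvGrp (pvIndexedLengths lst) l).map Prod.fst := by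
  unfold pvBuckets pvIndexedLengths
  rw [pvBuckets_eq_plain, PySem.Dict.getD_foldl_modify_append, PySem.Dict.getD_empty]
  simp [pvGrp, List.filter_map, List.map_map, Function.comp_def]

theorem pvBucket_keys (lst : List (Option (List Int))) :
    (pvBuckets lst).keys = PySem.Set.ofList ((pvIndexedLengths lst).map (fun p => p.2)) := by
  unfold pvBuckets pvIndexedLengths
  rw [pvBuckets_eq_plain,
    PySem.Dict.keys_foldl_modify_key _ Prod.fst [] (fun _ q v => v ++ [q.2]) _,
    PySem.Dict.keys_empty, PySem.Set.update_nil_left, List.map_map]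
  rfl

-- the arithmetic take for one bucket
def pvTake (m l n tot : Int) : Int :=
  if l = 0 then (if tot < m then n else 0)
  else min n (max 0 (PySem.Int.floordiv (m - 1 - tot) l))

-- A's greedy loop crosses one constant-length bucket exactly as the arithmetic take says
theorem pvALoop_bucket (m l : Int) (hl : 0 ≤ l) :
    ∀ (g : List (Int × Int)), (∀ p ∈ g, p.2 = l) →
    ∀ (rest : List (Int × Int)) (sel : List Int) (tot : Int),
      pvALoop m (g ++ rest) sel tot =
        (if pvTake m l g.length tot < (g.length : Int)
         then (sel ++ (g.map Prod.fst).take (pvTake m l g.length tot).toNat,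
               tot + pvTake m l g.length tot * l)
         else pvALoop m rest (sel ++ g.map Prod.fst) (tot + pvTake m l g.length tot * l)) := by
  intro g
  induction g with
  | nil =>
    intro _ rest sel tot
    have ht : pvTake m l 0 tot = 0 := by unfold pvTake; split_ifs <;> omega
    simp only [List.length_nil, Nat.cast_zero] at *
    rw [ht]
    simp
  | cons a g ih =>
    intro hg rest sel tot
    obtain ⟨i, l2⟩ := a
    have hil : l2 = l := hg (i, l2) (List.mem_cons_self ..)
    subst l2
    have hg' : ∀ p ∈ g, p.2 = l := fun p hp => hg p (by simp [hp])
    simp only [List.cons_append, pvALoop]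
    by_cases h : tot + l < m
    · rw [if_pos h, ih hg' rest (sel ++ [i]) (tot + l)]
      by_cases hl0 : l = 0
      · subst hl0
        have e1 : pvTake m 0 ((i, 0) :: g).length tot = (g.length : Int) + 1 := by
          unfold pvTake
          rw [if_pos rfl, if_pos (by omega)]
          simp
        have e2 : pvTake m 0 g.length (tot + 0) = (g.length : Int) := by
          unfold pvTake
          rw [if_pos rfl, if_pos (by omega)]
        rw [e1, e2]
        rw [if_neg (by omega), if_neg (by simp only [List.length_cons]; push_cast; omega)]
        simp
      · have hlpos : 0 < l := by omega
        have hq1 : 1 ≤ PySem.Int.floordiv (m - 1 - tot) l :=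
          (PySem.Int.le_floordiv_iff_mul_le hlpos).mpr (by omega)
        have hq' : PySem.Int.floordiv (m - 1 - (tot + l)) l =
            PySem.Int.floordiv (m - 1 - tot) l - 1 := by
          rw [PySem.Int.floordiv_eq_ediv_of_pos hlpos, PySem.Int.floordiv_eq_ediv_of_pos hlpos,
            show m - 1 - (tot + l) = (m - 1 - tot) + (-1) * l by ring,
            Int.add_mul_ediv_right _ _ (by omega : l ≠ 0)]
          ring
        set q := PySem.Int.floordiv (m - 1 - tot) l
        have e1 : pvTake m l ((i, l) :: g).length tot = min ((g.length : Int) + 1) q := by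
          unfold pvTake
          rw [if_neg hl0]
          simp only [List.length_cons]
          push_cast
          omega
        have e2 : pvTake m l g.length (tot + l) = min (g.length : Int) (q - 1) := by
          unfold pvTake; rw [if_neg hl0, hq']; omega
        rw [e1, e2]
        by_cases hlt : min (g.length : Int) (q - 1) < (g.length : Int)
        · rw [if_pos hlt, if_pos (by simp only [List.length_cons]; push_cast; omega)]
          have htn : (min ((g.length : Int) + 1) q).toNat = (min (g.length : Int) (q - 1)).toNat + 1 := by
            omega
          rw [List.map_cons, htn, List.take_succ_cons]
          simp only [Prod.mk.injEq]
          constructor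
          · simp
          · have : min ((g.length : Int) + 1) q = min (g.length : Int) (q - 1) + 1 := by omega
            rw [this]; ring
        · rw [if_neg hlt, if_neg (by simp only [List.length_cons]; push_cast; omega)]
          have ha : min (g.length : Int) (q - 1) = (g.length : Int) := by omega
          have hb : min ((g.length : Int) + 1) q = (g.length : Int) + 1 := by omega
          rw [ha, hb]
          congr 1
          · simp
          · ring
    · rw [if_neg h]
      have ht : pvTake m l ((i, l) :: g).length tot = 0 := by
        by_cases hl0 : l = 0
        · subst hl0; unfold pvTake; rw [if_pos rfl, if_neg (by omega)]
        · have hlpos : 0 < l := by omega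
          have hq0 : PySem.Int.floordiv (m - 1 - tot) l < 1 :=
            (PySem.Int.floordiv_lt_iff_lt_mul hlpos).mpr (by omega)
          unfold pvTake; rw [if_neg hl0]; omega
      rw [ht, if_pos (by simp only [List.length_cons]; push_cast; omega)]
      simp

-- every key in the bucket dict is a length, hence nonnegative
theorem pvKeys_nonneg (lst : List (Option (List Int))) :
    ∀ l ∈ (pvIndexedLengths lst).map (fun p => p.2), 0 ≤ l := by
  intro l hl
  obtain ⟨p, hp, hpl⟩ := List.mem_map.mp hl
  obtain ⟨a, _, ha⟩ := List.mem_filterMap.mp hp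
  cases h2 : a.2 with
  | none => simp [h2] at ha
  | some x =>
    rw [h2] at ha
    simp only [Option.some.injEq] at ha
    have : p.2 = (x.length : Int) := by rw [← ha]
    omega

-- B's bucket loop equals A's greedy loop run over the concatenated groups
theorem pvLoop_eq (lst : List (Option (List Int))) (m : Int) :
    ∀ ks : List Int, (∀ l ∈ ks, 0 ≤ l) → ∀ (sel : List Int) (tot : Int),
      pvBLoop (pvBuckets lst) m ks sel tot =
        pvALoop m (ks.flatMap (pvGrp (pvIndexedLengths lst))) sel tot := by
  intro ks
  induction ks with
  | nil => intro _ sel tot; rfl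
  | cons l ks ih =>
    intro hks sel tot
    have hl : 0 ≤ l := hks l (by simp)
    have hks' : ∀ l' ∈ ks, 0 ≤ l' := fun l' h => hks l' (by simp [h])
    simp only [pvBLoop, pvBucket_getD lst l, List.flatMap_cons]
    rw [pvALoop_bucket m l hl _ (pvGrp_keyed _ l)]
    have htake0 : 0 ≤ pvTake m l ((pvGrp (pvIndexedLengths lst) l).length : Int) tot := by
      unfold pvTake; split_ifs <;> omega
    simp only [List.length_map]
    have hfold : (if l = 0 then (if tot < m then (((pvGrp (pvIndexedLengths lst) l).length : Nat) : Int) else 0)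
        else min (((pvGrp (pvIndexedLengths lst) l).length : Nat) : Int)
          (max 0 (PySem.Int.floordiv (m - 1 - tot) l))) =
        pvTake m l ((pvGrp (pvIndexedLengths lst) l).length : Int) tot := rfl
    rw [hfold, PySem.List.slice_to _ htake0]
    have hle : pvTake m l ((pvGrp (pvIndexedLengths lst) l).length : Int) tot ≤
        ((pvGrp (pvIndexedLengths lst) l).length : Int) := by
      unfold pvTake; split_ifs <;> omega
    by_cases hc : pvTake m l ((pvGrp (pvIndexedLengths lst) l).length : Int) tot <
        ((pvGrp (pvIndexedLengths lst) l).length : Int)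
    · rw [if_pos hc, if_pos hc]
    · rw [if_neg hc, if_neg hc]
      have ht : pvTake m l ((pvGrp (pvIndexedLengths lst) l).length : Int) tot =
          ((pvGrp (pvIndexedLengths lst) l).length : Int) := by omega
      rw [ht]
      simp only [Int.toNat_natCast, ← List.length_map (f := Prod.fst), List.take_length]
      exact ih hks' _ _

-- ===== VERDICT (by name: the statement is the Claim_ definition above) =====
theorem min_indices_under_limit_spec : Claim_equal_min_indices_under_limit := by
  intro lst m _
  unfold Spec_min_indices_under_limit min_indices_under_limit min_indices_under_limit_alt
  show pvALoop m (PySem.List.sorted (pvIndexedLengths lst) (fun p => p.2) false) [] 0 =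
    pvBLoop (pvBuckets lst) m (PySem.List.sorted (pvBuckets lst).keys (fun x => x) false) [] 0
  rw [pvBucket_keys, pvSorted_eq_groups]
  exact (pvLoop_eq lst m _ (fun l hl => pvKeys_nonneg lst l
    (by
      rw [← PySem.Set.mem_ofList ((pvIndexedLengths lst).map (fun p => p.2)) l]
      exact (PySem.List.mem_sorted (PySem.Set.ofList ((pvIndexedLengths lst).map (fun p => p.2)))
        (fun x => x) false l).mp hl)) [] 0).symm
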